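-- pv_equiv track=rewrite | github.com/bryceustc/LeetCode_Note | python/Reverse-Words-In-A-String/Reverse-Words-In-A-String.py | cleanSpaces
-- ===== SOURCE A (Python) =====
-- def cleanSpaces(s):
--     n = len(s)
--     i=0
--     j=0
--     while j<n:
--         while j<n and s[j]==' ':
--             j+=1
--         while j<n and s[j]!=' ':
--             s[i]=s[j]
--             i+=1
--             j+=1
--         while j<n and s[j]==' ':
--             j+=1
--         if j<n:
--             s[i] = ' '
--             i+=1
--     return "".join(s[:i])
-- ===== SOURCE B (Python) =====
-- def cleanSpaces(s):
--     # Tokenize into runs of non-space elements, then rebuild with single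
--     # separators; mirrors A's in-place compaction of the prefix of s.
--     runs = []
--     run = []
--     for c in s:
--         if c == ' ':
--             if run:
--                 runs.append(run)
--                 run = []
--         else:
--             run.append(c)
--     if run:
--         runs.append(run)
--     comp = []
--     for k, t in enumerate(runs):
--         if k:
--             comp.append(' ')
--         comp.extend(t)
--     s[:len(comp)] = comp
--     return ''.join(comp)
-- ===== Notes on version B (the rewrite author's own statement) =====
-- stated objective: simpler
-- what changed: Replaced A's three nested index-marching while loops that overwrite the list in place with a single tokenizing pass that collects runs of non-space elements and rejoins them with single separators.
import Mathlib
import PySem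

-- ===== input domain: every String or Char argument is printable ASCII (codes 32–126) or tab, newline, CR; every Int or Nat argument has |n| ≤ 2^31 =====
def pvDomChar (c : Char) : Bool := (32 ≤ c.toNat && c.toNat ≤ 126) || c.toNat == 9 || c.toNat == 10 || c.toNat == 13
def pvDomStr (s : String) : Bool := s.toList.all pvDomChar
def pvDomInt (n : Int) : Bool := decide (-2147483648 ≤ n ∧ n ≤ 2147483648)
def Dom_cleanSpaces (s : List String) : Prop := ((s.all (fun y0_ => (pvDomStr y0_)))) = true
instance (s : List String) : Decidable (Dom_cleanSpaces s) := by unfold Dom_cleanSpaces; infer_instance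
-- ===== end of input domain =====

-- B replaces A's index-marching in-place compaction with a tokenize-and-rejoin pass (simpler);
-- A also mutates its argument in place and B mirrors that mutation in Python; the equivalence
-- proved here is about the return value.


-- ===== PORT A =====
-- 'while j<n and s[j]==' ' ': j+=1'  (structural recursion on a fuel bound n-j, a pure totality guard)
def aSkipGo (s : List String) (n : Nat) : Nat → Nat → Nat
  | 0, j => j
  | f+1, j => if j < n ∧ s.getD j "" = " " then aSkipGo s n f (j+1) else j

def aSkip (s : List String) (n j : Nat) : Nat := aSkipGo s n (n - j) j

-- 'while j<n and s[j]!=' ' ': s[i]=s[j]; i+=1; j+=1'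
def aCopyGo (n : Nat) : Nat → List String → Nat → Nat → List String × Nat × Nat
  | 0, s, i, j => (s, i, j)
  | f+1, s, i, j =>
    if j < n ∧ s.getD j "" ≠ " " then aCopyGo n f (s.set i (s.getD j "")) (i+1) (j+1)
    else (s, i, j)

def aCopy (s : List String) (n i j : Nat) : List String × Nat × Nat := aCopyGo n (n - j) s i j

-- the outer 'while j<n' loop of A; returns the final buffer and i
def aLoopGo (n : Nat) : Nat → List String → Nat → Nat → List String × Nat
  | 0, s, i, _j => (s, i)
  | f+1, s, i, j =>
    if j < n then
      if aSkip (aCopy s n i (aSkip s n j)).1 n (aCopy s n i (aSkip s n j)).2.2 < n then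
        aLoopGo n f ((aCopy s n i (aSkip s n j)).1.set (aCopy s n i (aSkip s n j)).2.1 " ")
          ((aCopy s n i (aSkip s n j)).2.1 + 1)
          (aSkip (aCopy s n i (aSkip s n j)).1 n (aCopy s n i (aSkip s n j)).2.2)
      else ((aCopy s n i (aSkip s n j)).1, (aCopy s n i (aSkip s n j)).2.1)
    else (s, i)

def aLoop (s : List String) (n i j : Nat) : List String × Nat := aLoopGo n (n - j) s i j

def cleanSpaces (s : List String) : String :=
  let n := s.length
  let r := aLoop s n 0 0
  PySem.Str.join "" (r.1.take r.2)

-- ===== PORT B =====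
def cleanSpaces_alt (s : List String) : String :=
  let p := s.foldl (fun (acc : List (List String) × List String) c =>
      if c = " " then
        (if acc.2 ≠ [] then (acc.1 ++ [acc.2], ([] : List String)) else acc)
      else (acc.1, acc.2 ++ [c])) ([], [])
  let runs := if p.2 ≠ [] then p.1 ++ [p.2] else p.1
  let comp := (PySem.List.enumerate runs).foldl (fun (acc : List String) kt =>
      (if kt.1 ≠ 0 then acc ++ [" "] else acc) ++ kt.2) []
  PySem.Str.join "" comp

-- ===== PRECONDITION & SPEC =====
def Spec_cleanSpaces (s : List String) (out : String) : Prop := out = cleanSpaces_alt s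
instance (s : List String) (out : String) : Decidable (Spec_cleanSpaces s out) := by unfold Spec_cleanSpaces; infer_instance

-- ===== CLAIM (what is proved, stated in full; the proofs are below) =====
def Claim_equal_cleanSpaces : Prop := ∀ (s : List String), Dom_cleanSpaces s → Spec_cleanSpaces s (cleanSpaces s)

-- ===== LEMMAS AND PROOFS =====

-- the common reference: maximal runs of non-" " elements, and their single-space rejoin
def W (l : List String) : List (List String) :=
  match l with
  | [] => []
  | c :: t =>
    if c = " " then W t
    else (c :: t.takeWhile (fun x => x ≠ " ")) :: W (t.dropWhile (fun x => x ≠ " "))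
termination_by l.length
decreasing_by
  · simp
  · have := List.length_dropWhile_le (p := fun x : String => x ≠ " ") (l := t)
    simp only [List.length_cons]
    omega

def catW (ws : List (List String)) : List String :=
  match ws with
  | [] => []
  | t :: rest => t ++ rest.flatMap (fun w => " " :: w)

-- W of an all-space prefix
theorem W_spaces_append (p x : List String) (hp : ∀ c ∈ p, c = " ") : W (p ++ x) = W x := by
  induction p with
  | nil => rfl
  | cons c t ih =>
    have hc : c = " " := hp c (by simp)
    rw [List.cons_append, W, if_pos hc]
    exact ih (fun d hd => hp d (by simp [hd]))

theorem W_cons_nonspace (c : String) (t : List String) (hc : c ≠ " ") :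
    W (c :: t) = (c :: t.takeWhile (fun x => x ≠ " ")) :: W (t.dropWhile (fun x => x ≠ " ")) := by
  rw [W, if_neg hc]

-- nonempty list starting with a non-space element
theorem W_head_nonspace (l : List String) (hl : l ≠ []) (hc : l.getD 0 "" ≠ " ") :
    W l = l.takeWhile (fun x => x ≠ " ") :: W (l.dropWhile (fun x => x ≠ " ")) := by
  cases l with
  | nil => exact absurd rfl hl
  | cons c t =>
    simp only [List.getD_cons_zero] at hc
    rw [W_cons_nonspace c t hc, List.takeWhile_cons, List.dropWhile_cons]
    simp [hc]

theorem catW_cons_ne (w : List String) (ws : List (List String)) (h : ws ≠ []) :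
    catW (w :: ws) = w ++ [" "] ++ catW ws := by
  cases ws with
  | nil => exact absurd rfl h
  | cons x r => simp [catW]

-- dropWhile as a drop
theorem dropWhile_eq_drop_len {α : Type} (p : α → Bool) (l : List α) :
    l.dropWhile p = l.drop (l.takeWhile p).length := by
  rw [List.dropWhile_eq_drop_findIdx_not, List.takeWhile_eq_take_findIdx_not, List.length_take]
  exact List.drop_eq_drop_min

-- basic facts about the fuelled skip
theorem aSkipGo_ge (s : List String) (n : Nat) : ∀ f j, j ≤ aSkipGo s n f j := by
  intro f
  induction f with
  | zero => intro j; simp [aSkipGo]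
  | succ f ih =>
    intro j
    simp only [aSkipGo]
    by_cases h : j < n ∧ s.getD j "" = " "
    · rw [if_pos h]
      have := ih (j+1)
      omega
    · rw [if_neg h]

theorem aSkip_ge (s : List String) (n j : Nat) : j ≤ aSkip s n j := aSkipGo_ge s n (n - j) j

theorem aSkipGo_of_ge (s : List String) (n : Nat) : ∀ f j, n ≤ j → aSkipGo s n f j = j := by
  intro f
  induction f with
  | zero => intro j _; simp [aSkipGo]
  | succ f _ =>
    intro j h
    simp only [aSkipGo]
    rw [if_neg (fun hc => absurd hc.1 (Nat.not_lt.mpr h))]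

theorem aSkip_of_ge (s : List String) (n j : Nat) (h : n ≤ j) : aSkip s n j = j :=
  aSkipGo_of_ge s n (n - j) j h

theorem aSkipGo_stop (s : List String) (n : Nat) : ∀ f j, n - j ≤ f →
    aSkipGo s n f j < n → s.getD (aSkipGo s n f j) "" ≠ " " := by
  intro f
  induction f with
  | zero =>
    intro j hf hlt
    simp only [aSkipGo] at hlt ⊢
    omega
  | succ f ih =>
    intro j hf hlt
    simp only [aSkipGo] at hlt ⊢
    by_cases h : j < n ∧ s.getD j "" = " "
    · rw [if_pos h] at hlt ⊢
      exact ih (j+1) (by omega) hlt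
    · rw [if_neg h] at hlt ⊢
      intro hc
      exact h ⟨hlt, hc⟩

theorem aSkip_stop (s : List String) (n j : Nat) (h : aSkip s n j < n) :
    s.getD (aSkip s n j) "" ≠ " " := aSkipGo_stop s n (n - j) j (le_refl _) h

theorem aCopyGo_of_ge (n : Nat) : ∀ f (s : List String) i j, n ≤ j →
    aCopyGo n f s i j = (s, i, j) := by
  intro f
  induction f with
  | zero => intro s i j _; simp [aCopyGo]
  | succ f _ =>
    intro s i j h
    simp only [aCopyGo]
    rw [if_neg (fun hc => absurd hc.1 (Nat.not_lt.mpr h))]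

theorem aCopy_of_ge (s : List String) (n i j : Nat) (h : n ≤ j) : aCopy s n i j = (s, i, j) :=
  aCopyGo_of_ge n (n - j) s i j h

-- characterization of aSkip
theorem aSkipGo_eq (s : List String) (n : Nat) (hn : n = s.length) : ∀ f j, n - j ≤ f →
    aSkipGo s n f j = j + ((s.drop j).takeWhile (fun c => c = " ")).length := by
  intro f
  induction f with
  | zero =>
    intro j hf
    rw [List.drop_eq_nil_of_le (by omega)]
    simp [aSkipGo]
  | succ f ih =>
    intro j hf
    simp only [aSkipGo]
    by_cases h : j < n ∧ s.getD j "" = " "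
    · rw [if_pos h]
      have hj : j < s.length := hn ▸ h.1
      have hdrop : s.drop j = s[j] :: s.drop (j+1) := List.drop_eq_getElem_cons hj
      have hsj : s[j] = " " := by rw [← List.getD_eq_getElem s "" hj]; exact h.2
      rw [ih (j+1) (by omega), hdrop, List.takeWhile_cons, if_pos (by simp [hsj])]
      simp; omega
    · rw [if_neg h]
      rcases Nat.lt_or_ge j n with hj | hj
      · have hj' : j < s.length := hn ▸ hj
        have hsj : s[j] ≠ " " := by rw [← List.getD_eq_getElem s "" hj']
                                    exact fun hc => h ⟨hj, hc⟩
        rw [List.drop_eq_getElem_cons hj', List.takeWhile_cons, if_neg (by simp [hsj])]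
        simp
      · rw [List.drop_eq_nil_of_le (by omega)]
        simp

theorem aSkip_eq (s : List String) (n j : Nat) (hn : n = s.length) :
    aSkip s n j = j + ((s.drop j).takeWhile (fun c => c = " ")).length :=
  aSkipGo_eq s n hn (n - j) j (le_refl _)

-- characterization of aCopy
theorem aCopyGo_spec (n : Nat) : ∀ f (s : List String) i j, n - j ≤ f → n = s.length → i ≤ j →
    (aCopyGo n f s i j).2.2 = j + ((s.drop j).takeWhile (fun c => c ≠ " ")).length ∧
    (aCopyGo n f s i j).2.1 = i + ((s.drop j).takeWhile (fun c => c ≠ " ")).length ∧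
    (aCopyGo n f s i j).1.length = s.length ∧
    (aCopyGo n f s i j).1.take (aCopyGo n f s i j).2.1 =
      s.take i ++ (s.drop j).takeWhile (fun c => c ≠ " ") ∧
    (aCopyGo n f s i j).1.drop (aCopyGo n f s i j).2.2 = s.drop (aCopyGo n f s i j).2.2 := by
  intro f
  induction f with
  | zero =>
    intro s i j hf hn hij
    have hw : (s.drop j).takeWhile (fun c => c ≠ " ") = [] := by
      rw [List.drop_eq_nil_of_le (by omega)]; rfl
    simp only [aCopyGo]
    exact ⟨by rw [hw]; simp, by rw [hw]; simp, by trivial, by rw [hw]; simp, by trivial⟩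
  | succ f ih =>
    intro s i j hf hn hij
    simp only [aCopyGo]
    by_cases h : j < n ∧ s.getD j "" ≠ " "
    · rw [if_pos h]
      have hj : j < s.length := hn ▸ h.1
      have hi : i < s.length := by omega
      have hgd : s.getD j "" = s[j] := List.getD_eq_getElem s "" hj
      have hsj : s[j] ≠ " " := by rw [← hgd]; exact h.2
      have hdropj : s.drop j = s[j] :: s.drop (j+1) := List.drop_eq_getElem_cons hj
      have hlen : (s.set i (s.getD j "")).length = s.length := by simp
      have hdrop1 : (s.set i (s.getD j "")).drop (j+1) = s.drop (j+1) :=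
        List.drop_set_of_lt (by omega)
      have htake1 : (s.set i (s.getD j "")).take (i+1) = s.take i ++ [s[j]] := by
        rw [hgd, List.set_eq_take_cons_drop _ hi, List.take_append]
        simp [List.take_take, List.length_take, Nat.min_eq_left (le_of_lt hi)]
      obtain ⟨e1, e2, e3, e4, e5⟩ :=
        ih (s.set i (s.getD j "")) (i+1) (j+1) (by omega) (by rw [hlen]; exact hn) (by omega)
      have hw : (s.drop j).takeWhile (fun c => c ≠ " ") =
          s[j] :: (s.drop (j+1)).takeWhile (fun c => c ≠ " ") := by
        rw [hdropj, List.takeWhile_cons, if_pos (by simp [hsj])]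
      rw [hdrop1] at e1 e2 e4
      refine ⟨by rw [e1, hw]; simp; omega, by rw [e2, hw]; simp; omega, by rw [e3, hlen], ?_, ?_⟩
      · rw [e4, htake1, hw]
        simp
      · rw [e5, e1]
        exact List.drop_set_of_lt (by omega)
    · rw [if_neg h]
      have hw : (s.drop j).takeWhile (fun c => c ≠ " ") = [] := by
        rcases Nat.lt_or_ge j n with hj | hj
        · have hj' : j < s.length := hn ▸ hj
          have hsj : s[j] = " " := by
            rw [← List.getD_eq_getElem s "" hj']
            by_contra hc; exact h ⟨hj, hc⟩
          rw [List.drop_eq_getElem_cons hj', List.takeWhile_cons, if_neg (by simp [hsj])]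
        · rw [List.drop_eq_nil_of_le (by omega)]; rfl
      exact ⟨by rw [hw]; simp, by rw [hw]; simp, by trivial, by rw [hw]; simp, by trivial⟩

theorem aCopy_spec (s : List String) (n i j : Nat) (hn : n = s.length) (hij : i ≤ j) :
    (aCopy s n i j).2.2 = j + ((s.drop j).takeWhile (fun c => c ≠ " ")).length ∧
    (aCopy s n i j).2.1 = i + ((s.drop j).takeWhile (fun c => c ≠ " ")).length ∧
    (aCopy s n i j).1.length = s.length ∧
    (aCopy s n i j).1.take (aCopy s n i j).2.1 =
      s.take i ++ (s.drop j).takeWhile (fun c => c ≠ " ") ∧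
    (aCopy s n i j).1.drop (aCopy s n i j).2.2 = s.drop (aCopy s n i j).2.2 :=
  aCopyGo_spec n (n - j) s i j (le_refl _) hn hij

theorem getD_drop_zero {α : Type} (l : List α) (k : Nat) (d : α) :
    (l.drop k).getD 0 d = l.getD k d := by
  simp [List.getD, List.getElem?_drop]

-- all elements of the space-prefix are " "
theorem takeWhile_space_all (l : List String) :
    ∀ c ∈ l.takeWhile (fun c => c = " "), c = " " := by
  intro c hc
  have := List.mem_takeWhile_imp hc
  simpa using this

-- the spaces-skip decomposition: drop j = space-prefix ++ drop (aSkip …)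
theorem drop_aSkip (s : List String) (n j : Nat) (hn : n = s.length) :
    s.drop (aSkip s n j) = (s.drop j).dropWhile (fun c => c = " ") ∧
    W (s.drop j) = W (s.drop (aSkip s n j)) := by
  have h1 : s.drop (aSkip s n j) = (s.drop j).dropWhile (fun c => c = " ") := by
    rw [aSkip_eq s n j hn, dropWhile_eq_drop_len, List.drop_drop]
  refine ⟨h1, ?_⟩
  conv_lhs => rw [← List.takeWhile_append_dropWhile (p := fun c => c = " ") (l := s.drop j)]
  rw [W_spaces_append _ _ (takeWhile_space_all (s.drop j)), h1]

-- facts about one skip-then-copy step, when the skip stops inside the buffer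
theorem loop_step (s : List String) (n i j : Nat) (hn : n = s.length) (hij : i ≤ j)
    (hlt : aSkip s n j < n) :
    (aCopy s n i (aSkip s n j)).2.1 =
        i + ((s.drop (aSkip s n j)).takeWhile (fun c => c ≠ " ")).length ∧
    (aCopy s n i (aSkip s n j)).2.2 =
        aSkip s n j + ((s.drop (aSkip s n j)).takeWhile (fun c => c ≠ " ")).length ∧
    (aCopy s n i (aSkip s n j)).1.length = s.length ∧
    (aCopy s n i (aSkip s n j)).1.take (aCopy s n i (aSkip s n j)).2.1 =
        s.take i ++ (s.drop (aSkip s n j)).takeWhile (fun c => c ≠ " ") ∧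
    (aCopy s n i (aSkip s n j)).1.drop (aCopy s n i (aSkip s n j)).2.2 =
        s.drop (aCopy s n i (aSkip s n j)).2.2 ∧
    W (s.drop j) =
        (s.drop (aSkip s n j)).takeWhile (fun c => c ≠ " ")
          :: W (s.drop (aCopy s n i (aSkip s n j)).2.2) ∧
    i ≤ aSkip s n j ∧
    1 ≤ ((s.drop (aSkip s n j)).takeWhile (fun c => c ≠ " ")).length := by
  have hj1 : j ≤ aSkip s n j := aSkip_ge s n j
  have hij1 : i ≤ aSkip s n j := le_trans hij hj1
  have hstop : s.getD (aSkip s n j) "" ≠ " " := aSkip_stop s n j hlt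
  have hne : s.drop (aSkip s n j) ≠ [] := by
    intro hc
    have := List.drop_eq_nil_iff.mp hc
    omega
  have hhd : (s.drop (aSkip s n j)).getD 0 "" ≠ " " := by
    rw [getD_drop_zero]; exact hstop
  obtain ⟨e1, e2, e3, e4, e5⟩ := aCopy_spec s n i (aSkip s n j) hn hij1
  have hWdec : W (s.drop (aSkip s n j)) =
      (s.drop (aSkip s n j)).takeWhile (fun c => c ≠ " ")
        :: W ((s.drop (aSkip s n j)).dropWhile (fun c => c ≠ " ")) :=
    W_head_nonspace _ hne hhd
  have hdw : (s.drop (aSkip s n j)).dropWhile (fun c => c ≠ " ") =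
      s.drop (aCopy s n i (aSkip s n j)).2.2 := by
    rw [dropWhile_eq_drop_len, List.drop_drop, e1, Nat.add_comm]
  have hwlen : 1 ≤ ((s.drop (aSkip s n j)).takeWhile (fun c => c ≠ " ")).length := by
    rcases hcons : s.drop (aSkip s n j) with _ | ⟨c, t⟩
    · exact absurd hcons hne
    · have hc : c ≠ " " := by
        rw [hcons] at hhd; simpa using hhd
      rw [List.takeWhile_cons, if_pos (by simp [hc])]
      simp
  refine ⟨e2, e1, e3, e4, e5, ?_, hij1, hwlen⟩
  rw [(drop_aSkip s n j hn).2, hWdec, hdw]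

-- after the copy, if the final skip stops inside the buffer the next word is non-empty
theorem skip2_facts (s : List String) (n i j : Nat) (hn : n = s.length) (hij : i ≤ j)
    (hlt : aSkip s n j < n) :
    aSkip (aCopy s n i (aSkip s n j)).1 n (aCopy s n i (aSkip s n j)).2.2 =
      (aCopy s n i (aSkip s n j)).2.2 +
        ((s.drop (aCopy s n i (aSkip s n j)).2.2).takeWhile (fun c => c = " ")).length ∧
    W (s.drop (aCopy s n i (aSkip s n j)).2.2) =
      W (s.drop
          (aSkip (aCopy s n i (aSkip s n j)).1 n (aCopy s n i (aSkip s n j)).2.2)) := by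
  obtain ⟨e2, e1, e3, e4, e5, hW, hij1, hwlen⟩ := loop_step s n i j hn hij hlt
  have hlen' : n = (aCopy s n i (aSkip s n j)).1.length := by rw [e3, hn]
  have hsk := aSkip_eq (aCopy s n i (aSkip s n j)).1 n (aCopy s n i (aSkip s n j)).2.2 hlen'
  rw [e5] at hsk
  refine ⟨hsk, ?_⟩
  have hdec := drop_aSkip (aCopy s n i (aSkip s n j)).1 n (aCopy s n i (aSkip s n j)).2.2 hlen'
  -- W over s instead of the copy buffer: the suffixes agree
  have hdw : s.drop (aSkip (aCopy s n i (aSkip s n j)).1 n (aCopy s n i (aSkip s n j)).2.2) =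
      (s.drop (aCopy s n i (aSkip s n j)).2.2).dropWhile (fun c => c = " ") := by
    rw [hsk, dropWhile_eq_drop_len, List.drop_drop, Nat.add_comm]
  conv_lhs => rw [← List.takeWhile_append_dropWhile (p := fun c => c = " ")
    (l := s.drop (aCopy s n i (aSkip s n j)).2.2)]
  rw [W_spaces_append _ _ (takeWhile_space_all _), hdw]

-- the main loop invariant
theorem aLoopGo_spec (n : Nat) : ∀ f (s : List String) i j, n - j ≤ f → n = s.length → i ≤ j →
    (aLoopGo n f s i j).1.take (aLoopGo n f s i j).2 = s.take i ++ catW (W (s.drop j)) := by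
  intro f
  induction f with
  | zero =>
    intro s i j hf hn hij
    rw [List.drop_eq_nil_of_le (by omega)]
    simp [aLoopGo, W, catW]
  | succ f ih =>
    intro s i j hf hn hij
    simp only [aLoopGo]
    by_cases h : j < n
    · rw [if_pos h]
      by_cases h2 : aSkip (aCopy s n i (aSkip s n j)).1 n (aCopy s n i (aSkip s n j)).2.2 < n
      · rw [if_pos h2]
        have hj1n : aSkip s n j < n := by
          by_contra hge
          rw [Nat.not_lt] at hge
          rw [aCopy_of_ge s n i (aSkip s n j) hge] at h2
          rw [aSkip_of_ge s n (aSkip s n j) hge] at h2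
          omega
        obtain ⟨e2, e1, e3, e4, e5, hW, hij1, hwlen⟩ := loop_step s n i j hn hij hj1n
        obtain ⟨hsk, hW2⟩ := skip2_facts s n i j hn hij hj1n
        have hj2j3 := aSkip_ge (aCopy s n i (aSkip s n j)).1 n (aCopy s n i (aSkip s n j)).2.2
        -- the copy cursor sits strictly below the next word
        have hstrict : (aCopy s n i (aSkip s n j)).2.1 <
            aSkip (aCopy s n i (aSkip s n j)).1 n (aCopy s n i (aSkip s n j)).2.2 := by
          have hij2 : (aCopy s n i (aSkip s n j)).2.1 ≤ (aCopy s n i (aSkip s n j)).2.2 := by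
            rw [e1, e2]; omega
          rcases Nat.lt_or_ge (aCopy s n i (aSkip s n j)).2.2 n with hj2n | hj2n
          · -- the copy stopped at a space, so the second skip advances
            have hne2 : s.drop (aCopy s n i (aSkip s n j)).2.2 ≠ [] := by
              intro hc
              have := List.drop_eq_nil_iff.mp hc
              omega
            have hsp : (s.drop (aCopy s n i (aSkip s n j)).2.2).getD 0 "" = " " := by
              have hdw : (s.drop (aSkip s n j)).dropWhile (fun c => c ≠ " ") =
                  s.drop (aCopy s n i (aSkip s n j)).2.2 := by
                rw [dropWhile_eq_drop_len, List.drop_drop, e1, Nat.add_comm]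
              have hne3 : (s.drop (aSkip s n j)).dropWhile (fun c => c ≠ " ") ≠ [] := by
                rw [hdw]; exact hne2
              have hx := List.head_dropWhile_not (fun c => c ≠ " ") hne3
              have hhead : ((s.drop (aSkip s n j)).dropWhile (fun c => c ≠ " ")).head hne3 = " " := by
                simpa using hx
              rw [← hdw, List.getD_eq_getElem?_getD, ← List.head?_eq_getElem?,
                List.head?_eq_some_head hne3, hhead]
              rfl
            have hsp2 : 1 ≤ ((s.drop (aCopy s n i (aSkip s n j)).2.2).takeWhile
                (fun c => c = " ")).length := by
              rcases hc : s.drop (aCopy s n i (aSkip s n j)).2.2 with _ | ⟨c, t⟩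
              · exact absurd hc hne2
              · rw [hc] at hsp
                simp only [List.getD_cons_zero] at hsp
                rw [List.takeWhile_cons, if_pos (by simp [hsp])]
                simp
            omega
          · -- the buffer is exhausted: the second skip cannot stop below n
            exfalso
            have : s.drop (aCopy s n i (aSkip s n j)).2.2 = [] :=
              List.drop_eq_nil_of_le (by omega)
            rw [hsk, this] at h2
            simp at h2
            omega
        have hi2len : (aCopy s n i (aSkip s n j)).2.1 < (aCopy s n i (aSkip s n j)).1.length := by
          rw [e3]
          omega
        have hfuel : n - aSkip (aCopy s n i (aSkip s n j)).1 n (aCopy s n i (aSkip s n j)).2.2 ≤ f := by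
          have hj1ge := aSkip_ge s n j
          omega
        rw [ih _ _ _ hfuel (by rw [List.length_set, e3]; exact hn) (by omega)]
        -- rewrite the pieces
        have htake : ((aCopy s n i (aSkip s n j)).1.set (aCopy s n i (aSkip s n j)).2.1 " ").take
            ((aCopy s n i (aSkip s n j)).2.1 + 1) =
            s.take i ++ (s.drop (aSkip s n j)).takeWhile (fun c => c ≠ " ") ++ [" "] := by
          rw [List.set_eq_take_cons_drop _ hi2len, List.take_append, e4]
          have hmin : min i s.length = i := Nat.min_eq_left (by omega)
          rw [List.take_of_length_le (by simp [hmin, e2])]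
          have h1 : (aCopy s n i (aSkip s n j)).2.1 + 1 -
              (List.take i s ++ (s.drop (aSkip s n j)).takeWhile (fun c => c ≠ " ")).length = 1 := by
            simp [hmin, e2]
          rw [h1]
          simp
        have hdropset : ((aCopy s n i (aSkip s n j)).1.set (aCopy s n i (aSkip s n j)).2.1 " ").drop
            (aSkip (aCopy s n i (aSkip s n j)).1 n (aCopy s n i (aSkip s n j)).2.2) =
            s.drop (aSkip (aCopy s n i (aSkip s n j)).1 n (aCopy s n i (aSkip s n j)).2.2) := by
          rw [List.drop_set_of_lt hstrict]
          have : (aCopy s n i (aSkip s n j)).1.drop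
              (aSkip (aCopy s n i (aSkip s n j)).1 n (aCopy s n i (aSkip s n j)).2.2) =
              ((aCopy s n i (aSkip s n j)).1.drop (aCopy s n i (aSkip s n j)).2.2).drop
                (aSkip (aCopy s n i (aSkip s n j)).1 n (aCopy s n i (aSkip s n j)).2.2 -
                  (aCopy s n i (aSkip s n j)).2.2) := by
            rw [List.drop_drop]
            congr 1
            omega
          rw [this, e5, List.drop_drop]
          congr 1
          omega
        have hWne : W (s.drop
            (aSkip (aCopy s n i (aSkip s n j)).1 n (aCopy s n i (aSkip s n j)).2.2)) ≠ [] := by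
          have hlen' : n = (aCopy s n i (aSkip s n j)).1.length := by rw [e3, hn]
          have hstop2 := aSkip_stop (aCopy s n i (aSkip s n j)).1 n (aCopy s n i (aSkip s n j)).2.2 h2
          have hne3 : s.drop
              (aSkip (aCopy s n i (aSkip s n j)).1 n (aCopy s n i (aSkip s n j)).2.2) ≠ [] := by
            intro hc
            have := List.drop_eq_nil_iff.mp hc
            omega
          have hgd : (s.drop
              (aSkip (aCopy s n i (aSkip s n j)).1 n (aCopy s n i (aSkip s n j)).2.2)).getD 0 "" ≠
              " " := by
            rw [getD_drop_zero]
            -- transfer the head from the copy buffer to s via the equal suffixes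
            have hgd2 : (aCopy s n i (aSkip s n j)).1.getD
                (aSkip (aCopy s n i (aSkip s n j)).1 n (aCopy s n i (aSkip s n j)).2.2) "" =
                s.getD (aSkip (aCopy s n i (aSkip s n j)).1 n (aCopy s n i (aSkip s n j)).2.2) "" := by
              rw [← getD_drop_zero, ← getD_drop_zero
                (l := s) (k := aSkip (aCopy s n i (aSkip s n j)).1 n (aCopy s n i (aSkip s n j)).2.2)]
              congr 1
              have : (aCopy s n i (aSkip s n j)).1.drop
                  (aSkip (aCopy s n i (aSkip s n j)).1 n (aCopy s n i (aSkip s n j)).2.2) =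
                  ((aCopy s n i (aSkip s n j)).1.drop (aCopy s n i (aSkip s n j)).2.2).drop
                    (aSkip (aCopy s n i (aSkip s n j)).1 n (aCopy s n i (aSkip s n j)).2.2 -
                      (aCopy s n i (aSkip s n j)).2.2) := by
                rw [List.drop_drop]; congr 1; omega
              rw [this, e5, List.drop_drop]
              congr 1
              omega
            rw [← hgd2]
            exact hstop2
          rw [W_head_nonspace _ hne3 hgd]
          simp
        rw [htake, hdropset, hW, hW2,
          catW_cons_ne _ _ hWne]
        simp
      · rw [if_neg h2]
        rw [Nat.not_lt] at h2
        rcases Nat.lt_or_ge (aSkip s n j) n with hj1n | hj1n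
        · obtain ⟨e2, e1, e3, e4, e5, hW, hij1, hwlen⟩ := loop_step s n i j hn hij hj1n
          obtain ⟨hsk, hW2⟩ := skip2_facts s n i j hn hij hj1n
          have hj3n : n ≤ aSkip (aCopy s n i (aSkip s n j)).1 n (aCopy s n i (aSkip s n j)).2.2 := by
            omega
          have hnil : s.drop
              (aSkip (aCopy s n i (aSkip s n j)).1 n (aCopy s n i (aSkip s n j)).2.2) = [] :=
            List.drop_eq_nil_of_le (by omega)
          rw [e4, hW, hW2, hnil]
          simp [W, catW]
        · rw [aCopy_of_ge s n i (aSkip s n j) hj1n]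
          have hnil : s.drop (aSkip s n j) = [] := List.drop_eq_nil_of_le (by omega)
          rw [(drop_aSkip s n j hn).2, hnil]
          simp [W, catW]
    · rw [if_neg h]
      rw [List.drop_eq_nil_of_le (by omega)]
      simp [W, catW]

theorem aLoop_spec (s : List String) (n i j : Nat) (hn : n = s.length) (hij : i ≤ j) :
    (aLoop s n i j).1.take (aLoop s n i j).2 = s.take i ++ catW (W (s.drop j)) :=
  aLoopGo_spec n (n - j) s i j (le_refl _) hn hij

-- A computes the space-normalised join
theorem cleanSpaces_eq (s : List String) :
    cleanSpaces s = PySem.Str.join "" (catW (W s)) := by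
  have hbody : cleanSpaces s =
      PySem.Str.join "" ((aLoop s s.length 0 0).1.take (aLoop s s.length 0 0).2) := rfl
  have h := aLoop_spec s s.length 0 0 rfl (le_refl 0)
  simp only [List.take_zero, List.nil_append, List.drop_zero] at h
  rw [hbody, h]

-- B-side: the tokenizing fold, named
def gW (run : List String) (l : List String) : List (List String) :=
  match l with
  | [] => if run ≠ [] then [run] else []
  | c :: t => if c = " " then (if run ≠ [] then run :: gW [] t else gW [] t) else gW (run ++ [c]) t

theorem gW_eq (l : List String) : ∀ run, gW run l =
    if run = [] then W l
    else (run ++ l.takeWhile (fun x => x ≠ " ")) :: W (l.dropWhile (fun x => x ≠ " ")) := by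
  induction l with
  | nil =>
    intro run
    by_cases hr : run = [] <;> simp [gW, W, hr]
  | cons c t ih =>
    intro run
    by_cases hc : c = " "
    · subst hc
      by_cases hr : run = []
      · simp [gW, hr, ih, W]
      · simp [gW, hr, ih, W]
    · simp only [gW, if_neg hc]
      rw [ih (run ++ [c])]
      by_cases hr : run = []
      · subst hr
        rw [if_neg (by simp), if_pos rfl, W_cons_nonspace c t hc]
        simp
      · rw [if_neg (by simp), if_neg hr,
          List.takeWhile_cons, if_pos (by simp [hc]), List.dropWhile_cons, if_pos (by simp [hc])]
        simp

theorem b_fold (l : List String) : ∀ (toks : List (List String)) (run : List String),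
    (if (l.foldl (fun (acc : List (List String) × List String) c =>
          if c = " " then
            (if acc.2 ≠ [] then (acc.1 ++ [acc.2], ([] : List String)) else acc)
          else (acc.1, acc.2 ++ [c])) (toks, run)).2 ≠ [] then (l.foldl (fun (acc : List (List String) × List String) c =>
          if c = " " then
            (if acc.2 ≠ [] then (acc.1 ++ [acc.2], ([] : List String)) else acc)
          else (acc.1, acc.2 ++ [c])) (toks, run)).1 ++ [(l.foldl (fun (acc : List (List String) × List String) c =>
          if c = " " then
            (if acc.2 ≠ [] then (acc.1 ++ [acc.2], ([] : List String)) else acc)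
          else (acc.1, acc.2 ++ [c])) (toks, run)).2] else (l.foldl (fun (acc : List (List String) × List String) c =>
          if c = " " then
            (if acc.2 ≠ [] then (acc.1 ++ [acc.2], ([] : List String)) else acc)
          else (acc.1, acc.2 ++ [c])) (toks, run)).1) = toks ++ gW run l := by
  induction l with
  | nil =>
    intro toks run
    by_cases hr : run = [] <;> simp [gW, hr]
  | cons c t ih =>
    intro toks run
    simp only [List.foldl_cons]
    by_cases hc : c = " "
    · subst hc
      by_cases hr : run = []
      · have hstep : (if (" " : String) = " " then
              (if run ≠ [] then (toks ++ [run], ([] : List String)) else (toks, run))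
            else (toks, run ++ [" "])) = (toks, run) := by simp [hr]
        rw [hstep, ih]
        simp [gW, hr]
      · have hstep : (if (" " : String) = " " then
              (if run ≠ [] then (toks ++ [run], ([] : List String)) else (toks, run))
            else (toks, run ++ [" "])) = (toks ++ [run], ([] : List String)) := by simp [hr]
        rw [hstep, ih]
        simp [gW, hr]
    · have hstep : (if c = " " then
              (if run ≠ [] then (toks ++ [run], ([] : List String)) else (toks, run))
            else (toks, run ++ [c])) = (toks, run ++ [c]) := by simp [hc]
      rw [hstep, ih]
      simp [gW, hc]

theorem enum_fold (ws : List (List String)) : ∀ (k : Int) (acc : List String), 1 ≤ k →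
    (PySem.List.enumerate ws k).foldl (fun (acc : List String) kt =>
      (if kt.1 ≠ 0 then acc ++ [" "] else acc) ++ kt.2) acc =
    acc ++ ws.flatMap (fun w => " " :: w) := by
  induction ws with
  | nil => intro k acc hk; simp [PySem.List.enumerate_nil]
  | cons w ws ih =>
    intro k acc hk
    rw [PySem.List.enumerate_cons, List.foldl_cons]
    have hstep : (if ((k, w) : Int × List String).1 ≠ 0 then acc ++ [" "] else acc) ++
        ((k, w) : Int × List String).2 = (acc ++ [" "]) ++ w := by
      simp [show (k : Int) ≠ 0 from by omega]
    rw [hstep, ih (k+1) _ (by omega)]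
    simp

theorem comp_eq (ws : List (List String)) :
    (PySem.List.enumerate ws).foldl (fun (acc : List String) kt =>
      (if kt.1 ≠ 0 then acc ++ [" "] else acc) ++ kt.2) [] = catW ws := by
  cases ws with
  | nil => simp [catW, PySem.List.enumerate_nil]
  | cons t rest =>
    rw [PySem.List.enumerate_cons, List.foldl_cons]
    have hstep : (if (((0 : Int), t) : Int × List String).1 ≠ 0 then
        ([] : List String) ++ [" "] else ([] : List String)) ++
        (((0 : Int), t) : Int × List String).2 = t := by simp
    rw [hstep, show (0 : Int) + 1 = 1 from by norm_num, enum_fold rest 1 t (by norm_num)]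
    simp [catW]

-- B computes the space-normalised join
theorem cleanSpaces_alt_eq (s : List String) :
    cleanSpaces_alt s = PySem.Str.join "" (catW (W s)) := by
  have hbody : cleanSpaces_alt s = PySem.Str.join ""
      ((PySem.List.enumerate
        (if (s.foldl (fun (acc : List (List String) × List String) c =>
          if c = " " then
            (if acc.2 ≠ [] then (acc.1 ++ [acc.2], ([] : List String)) else acc)
          else (acc.1, acc.2 ++ [c])) ([], [])).2 ≠ [] then (s.foldl (fun (acc : List (List String) × List String) c =>
          if c = " " then
            (if acc.2 ≠ [] then (acc.1 ++ [acc.2], ([] : List String)) else acc)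
          else (acc.1, acc.2 ++ [c])) ([], [])).1 ++ [(s.foldl (fun (acc : List (List String) × List String) c =>
          if c = " " then
            (if acc.2 ≠ [] then (acc.1 ++ [acc.2], ([] : List String)) else acc)
          else (acc.1, acc.2 ++ [c])) ([], [])).2] else (s.foldl (fun (acc : List (List String) × List String) c =>
          if c = " " then
            (if acc.2 ≠ [] then (acc.1 ++ [acc.2], ([] : List String)) else acc)
          else (acc.1, acc.2 ++ [c])) ([], [])).1)).foldl
          (fun (acc : List String) kt =>
            (if kt.1 ≠ 0 then acc ++ [" "] else acc) ++ kt.2) []) := rfl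
  have hfold := b_fold s [] []
  rw [hbody, hfold, List.nil_append,
    show gW [] s = W s from by rw [gW_eq s [], if_pos rfl],
    comp_eq]

-- ===== VERDICT (by name: the statement is the Claim_ definition above) =====
theorem cleanSpaces_spec : Claim_equal_cleanSpaces := by
  intro s _
  unfold Spec_cleanSpaces
  rw [cleanSpaces_eq, cleanSpaces_alt_eq]
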